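-- pv_equiv track=rewrite | github.com/csingh/interview_prep | codefights/typos.py | typosquatting
-- ===== SOURCE A (Python) =====
-- def num_typos(str, k, n=1):
--     if str == "" or n > k: return 0
--
--     num = 0
--     for start in range(len(str) - 1):
--         if str[start] != str[start+1]:
--             num += 1 + num_typos(str[:start], k, n+1) + num_typos(str[start+1:], k, n+1)
--
--     return num
--
-- def num_typos_for_domain(domain, k):
--     sub_parts = domain.split(".")
--
--     num = 0
--     for sp in sub_parts:
--         num += num_typos(sp, k)
--
--     return num
--
-- def typosquatting(n, domain):
--     if num_typos_for_domain(domain, 1000) <= n: return -1 #cheating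
--     if n == 0: return 0
--
--     k = 0
--     count = 1
--     while count <= n:
--         num = num_typos_for_domain(domain, count)
--         if num <= n:
--             k = count
--         count += 1
--     return k
-- ===== SOURCE B (Python) =====
-- def typosquatting(n, domain):
--     # B: memoized DP over (break-segment, depth) subproblems instead of A's
--     # naive exponential recursion over string slices, and a binary search for
--     # the answer k (the typo count is monotone in the depth budget) instead of
--     # A's linear scan of every count from 1 to n.
--     memo = {}
--
--     def count(seg, d):
--         # seg: strictly increasing tuple of break positions; d: depth budget.
--         d = min(d, len(seg))          # the recursion consumes one break per level
--         if d <= 0: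
--             return 0
--         key = (seg, d)
--         if key in memo:
--             return memo[key]
--         total = 0
--         for t, b in enumerate(seg):
--             left = seg[:t - 1] if t > 0 and seg[t - 1] == b - 1 else seg[:t]
--             total += 1 + count(left, d - 1) + count(seg[t + 1:], d - 1)
--         memo[key] = total
--         return total
--
--     def breaks(s):
--         return tuple(i for i in range(len(s) - 1) if s[i] != s[i + 1])
--
--     bparts = [breaks(p) for p in domain.split(".")]
--
--     def f(c):
--         return sum(count(bs, c) for bs in bparts)
--
--     if f(1000) <= n:
--         return -1
--     if n == 0:
--         return 0
--     lo, hi = 0, n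
--     while lo < hi:
--         mid = lo + (hi - lo + 1) // 2
--         if f(mid) <= n:
--             lo = mid
--         else:
--             hi = mid - 1
--     return lo
-- ===== Notes on version B (the rewrite author's own statement) =====
-- stated objective: faster
-- what changed: B replaces A's exponential recursion over string slices by a memoized DP over (break-position segment, depth) subproblems with the depth budget capped at the segment length (where the count saturates), and finds the answer k by binary search over [0, n] (the typo total is monotone in the depth budget) instead of A's linear scan of every count from 1 to n.
import Mathlib
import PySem

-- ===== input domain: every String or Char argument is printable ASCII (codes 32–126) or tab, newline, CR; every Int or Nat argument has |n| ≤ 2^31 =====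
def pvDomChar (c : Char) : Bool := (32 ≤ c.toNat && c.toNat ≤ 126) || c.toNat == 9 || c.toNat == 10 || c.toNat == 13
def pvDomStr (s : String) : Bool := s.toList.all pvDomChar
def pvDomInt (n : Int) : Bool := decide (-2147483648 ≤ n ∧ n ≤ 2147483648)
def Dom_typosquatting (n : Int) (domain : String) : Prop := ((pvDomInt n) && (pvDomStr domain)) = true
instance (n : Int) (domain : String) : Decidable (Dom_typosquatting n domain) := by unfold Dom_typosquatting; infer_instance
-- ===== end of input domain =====

-- B replaces A's exponential recursion over string slices by a memoized DP over
-- (break-position segment, depth budget) subproblems (the depth is capped by the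
-- segment length, at which the count saturates) and finds the answer k by binary
-- search instead of A's linear scan of every count from 1 to n.

-- ===== PORT A =====
-- num_typos(str, k, n): the 'for start in range(len(str)-1)' loop is numTyposLoop (loop indices
-- are always in range, so List.getD is exact for str[start]).
mutual
def numTypos (s : List Char) (k n : Int) : Int :=
  if s = [] ∨ n > k then 0
  else numTyposLoop s k n 0
termination_by ((k - n + 1).toNat, s.length, 1, 0)
decreasing_by
  simp [Prod.lex_iff]

def numTyposLoop (s : List Char) (k n : Int) (start : Nat) : Int :=
  if start + 1 < s.length then
    (if s.getD start ' ' ≠ s.getD (start + 1) ' ' then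
       1 + numTypos (s.take start) k (n + 1) + numTypos (s.drop (start + 1)) k (n + 1)
     else 0) + numTyposLoop s k n (start + 1)
  else 0
termination_by ((k - n + 1).toNat, s.length, 0, s.length - start)
decreasing_by
  · simp [Prod.lex_iff, List.length_take]; omega
  · simp [Prod.lex_iff, List.length_drop]; omega
  · simp [Prod.lex_iff]; omega
end

-- num_typos_for_domain(domain, k)
def numTyposForDomain (domain : String) (k : Int) : Int :=
  (PySem.Chars.splitOn domain.toList ['.']).foldl (fun acc sp => acc + numTypos sp k 1) 0

-- the 'while count <= n' loop of A
def typoLoop (domain : String) (n k count : Int) : Int :=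
  if count ≤ n then
    typoLoop domain n (if numTyposForDomain domain count ≤ n then count else k) (count + 1)
  else k
termination_by (n + 1 - count).toNat
decreasing_by omega

def typosquatting (n : Int) (domain : String) : Int :=
  if numTyposForDomain domain 1000 ≤ n then -1
  else if n = 0 then 0
  else typoLoop domain n 0 1

-- ===== PORT B =====
-- breaks(s) = tuple(i for i in range(len(s)-1) if s[i] != s[i+1])
def breaksAlt (s : List Char) : List Int :=
  List.map (fun (i : Nat) => (i : Int))
    ((List.range (s.length - 1)).filter (fun i => s.getD i ' ' != s.getD (i + 1) ' '))

-- count(seg, d): B's DP recurrence over a break segment with the depth budget capped at the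
-- segment length.  B's Python memoizes these calls in a dict; the memo is a pure cache, so the
-- port is the same recurrence without the cache (identical values on every input).
-- The 'for t, b in enumerate(seg)' loop is cntLoop (t is the running index into bs).
mutual
def cnt (bs : List Int) (d : Int) : Int :=
  if h : min d (bs.length : Int) ≤ 0 then 0
  else cntLoop bs (min d (bs.length : Int) - 1) 0 bs
termination_by (d.toNat, 0, 0)
decreasing_by
  simp [Prod.lex_iff]; omega

def cntLoop (bs : List Int) (d1 : Int) (t : Nat) : List Int → Int
  | [] => 0
  | b :: rest =>
      (1 + cnt (if 0 < t ∧ bs.getD (t - 1) 0 = b - 1 then bs.take (t - 1) else bs.take t) d1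
         + cnt (bs.drop (t + 1)) d1)
      + cntLoop bs d1 (t + 1) rest
termination_by pending => (d1.toNat, 1, pending.length)
decreasing_by
  · simp [Prod.lex_iff]
  · simp [Prod.lex_iff]
  · simp [Prod.lex_iff]
end

-- f(c) = sum(count(bs, c) for bs in bparts)
def fAlt (bparts : List (List Int)) (c : Int) : Int :=
  bparts.foldl (fun acc bs => acc + cnt bs c) 0

-- the 'while lo < hi' binary-search loop of B; mid = lo + (hi-lo+1)//2 is inlined
def bsearchAlt (bparts : List (List Int)) (n lo hi : Int) : Int :=
  if h : lo < hi then
    if fAlt bparts (lo + PySem.Int.floordiv (hi - lo + 1) 2) ≤ n then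
      bsearchAlt bparts n (lo + PySem.Int.floordiv (hi - lo + 1) 2) hi
    else
      bsearchAlt bparts n lo (lo + PySem.Int.floordiv (hi - lo + 1) 2 - 1)
  else lo
termination_by (hi - lo).toNat
decreasing_by
  all_goals
    rw [PySem.Int.floordiv_eq_ediv_of_pos (by norm_num : (0:Int) < 2)]
    omega

def typosquatting_alt (n : Int) (domain : String) : Int :=
  let bparts := (PySem.Chars.splitOn domain.toList ['.']).map breaksAlt
  if fAlt bparts 1000 ≤ n then -1
  else if n = 0 then 0
  else bsearchAlt bparts n 0 n

-- ===== PRECONDITION & SPEC =====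
def Spec_typosquatting (n : Int) (domain : String) (out : Int) : Prop := out = typosquatting_alt n domain
instance (n : Int) (domain : String) (out : Int) : Decidable (Spec_typosquatting n domain out) := by unfold Spec_typosquatting; infer_instance

-- ===== CLAIM (what is proved, stated in full; the proofs are below) =====
def Claim_equal_typosquatting : Prop := ∀ (n : Int) (domain : String), Dom_typosquatting n domain → Spec_typosquatting n domain (typosquatting n domain)

-- ===== LEMMAS AND PROOFS =====

-- Ghost intermediate (proof-only): A's recurrence expressed over filtered break-position
-- lists with an uncapped budget; it bridges A's string recursion to B's segment DP.
mutual
def countB (bs : List Int) (r : Int) : Int :=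
  if h : r ≤ 0 ∨ bs = [] then 0
  else countLoop bs r (by push_neg at h; omega) bs
termination_by (r.toNat, 1, 0)
decreasing_by
  simp [Prod.lex_iff]

def countLoop (all : List Int) (r : Int) (hr : 0 < r) : List Int → Int
  | [] => 0
  | b :: rest =>
    (1 + countB (all.filter (fun x => decide (x ≤ b - 2))) (r - 1)
       + countB (all.filter (fun x => decide (b + 1 ≤ x))) (r - 1))
      + countLoop all r hr rest
termination_by pending => (r.toNat, 0, pending.length)
decreasing_by
  · simp [Prod.lex_iff]; omega
  · simp [Prod.lex_iff]; omega
  · simp [Prod.lex_iff]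
end

def fGhost (bparts : List (List Int)) (k : Int) : Int :=
  bparts.foldl (fun acc bs => acc + countB bs k) 0

theorem countB_nonpos (bs : List Int) (r : Int) (h : r ≤ 0) : countB bs r = 0 := by
  rw [countB]; rw [dif_pos (Or.inl h)]

theorem countB_nonneg (m : Nat) : ∀ (bs : List Int) (r : Int), r.toNat ≤ m → 0 ≤ countB bs r := by
  induction m with
  | zero =>
    intro bs r h
    rw [countB_nonpos bs r (by omega)]
  | succ m ih =>
    intro bs r h
    rw [countB]
    split
    · exact le_refl 0
    · rename_i hg
      push_neg at hg
      have loop : ∀ pending : List Int, 0 ≤ countLoop bs r (by omega) pending := by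
        intro pending
        induction pending with
        | nil => rw [countLoop]
        | cons b rest ihp =>
          rw [countLoop]
          have h1 := ih (bs.filter (fun x => decide (x ≤ b - 2))) (r - 1) (by omega)
          have h2 := ih (bs.filter (fun x => decide (b + 1 ≤ x))) (r - 1) (by omega)
          omega
      exact loop bs

theorem countB_mono (m : Nat) : ∀ (bs : List Int) (r r' : Int), r ≤ r' → r'.toNat ≤ m →
    countB bs r ≤ countB bs r' := by
  induction m with
  | zero =>
    intro bs r r' hrr h
    rw [countB_nonpos bs r (by omega), countB_nonpos bs r' (by omega)]
  | succ m ih =>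
    intro bs r r' hrr h
    by_cases hr : r ≤ 0
    · rw [countB_nonpos bs r hr]
      exact countB_nonneg (m + 1) bs r' h
    by_cases hbs : bs = []
    · subst hbs
      rw [countB, countB]
      simp
    rw [countB, countB, dif_neg (by push_neg; exact ⟨by omega, hbs⟩),
        dif_neg (by push_neg; exact ⟨by omega, hbs⟩)]
    have loop : ∀ pending : List Int,
        countLoop bs r (by omega) pending ≤ countLoop bs r' (by omega) pending := by
      intro pending
      induction pending with
      | nil => rw [countLoop, countLoop]
      | cons b rest ihp =>
        rw [countLoop, countLoop]
        have h1 := ih (bs.filter (fun x => decide (x ≤ b - 2))) (r - 1) (r' - 1) (by omega) (by omega)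
        have h2 := ih (bs.filter (fun x => decide (b + 1 ≤ x))) (r - 1) (r' - 1) (by omega) (by omega)
        omega
    exact loop bs

theorem filter_map_add (bs : List Int) (c : Int) (p : Int → Bool) :
    (bs.map (fun x => x + c)).filter p = (bs.filter (fun x => p (x + c))).map (fun x => x + c) := by
  rw [List.filter_map]
  rfl

theorem countB_shift (m : Nat) : ∀ (bs : List Int) (c r : Int), r.toNat ≤ m →
    countB (bs.map (fun x => x + c)) r = countB bs r := by
  induction m with
  | zero =>
    intro bs c r h
    rw [countB_nonpos _ r (by omega), countB_nonpos bs r (by omega)]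
  | succ m ih =>
    intro bs c r h
    by_cases hr : r ≤ 0
    · rw [countB_nonpos _ r hr, countB_nonpos bs r hr]
    by_cases hbs : bs = []
    · subst hbs; rfl
    rw [countB, countB, dif_neg (by push_neg; exact ⟨by omega, by simp [hbs]⟩),
        dif_neg (by push_neg; exact ⟨by omega, hbs⟩)]
    have loop : ∀ pending : List Int,
        countLoop (bs.map (fun x => x + c)) r (by omega) (pending.map (fun x => x + c)) =
          countLoop bs r (by omega) pending := by
      intro pending
      induction pending with
      | nil => rw [List.map_nil, countLoop, countLoop]
      | cons b rest ihp =>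
        rw [List.map_cons, countLoop, countLoop]
        have e1 : (bs.map (fun x => x + c)).filter (fun x => decide (x ≤ b + c - 2)) =
            (bs.filter (fun x => decide (x ≤ b - 2))).map (fun x => x + c) := by
          rw [filter_map_add]
          congr 1
          apply List.filter_congr
          intro x _
          rw [decide_eq_decide]
          omega
        have e2 : (bs.map (fun x => x + c)).filter (fun x => decide (b + c + 1 ≤ x)) =
            (bs.filter (fun x => decide (b + 1 ≤ x))).map (fun x => x + c) := by
          rw [filter_map_add]
          congr 1
          apply List.filter_congr
          intro x _
          rw [decide_eq_decide]
          omega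
        rw [e1, e2, ihp,
            ih (bs.filter (fun x => decide (x ≤ b - 2))) c (r - 1) (by omega),
            ih (bs.filter (fun x => decide (b + 1 ≤ x))) c (r - 1) (by omega)]
    exact loop bs

theorem getD_take (s : List Char) (st i : Nat) (h : i < st) :
    (s.take st).getD i ' ' = s.getD i ' ' := by
  simp [List.getD_eq_getElem?_getD, List.getElem?_take, h]

theorem getD_drop (s : List Char) (c i : Nat) :
    (s.drop c).getD i ' ' = s.getD (c + i) ' ' := by
  simp [List.getD_eq_getElem?_getD, List.getElem?_drop]

theorem filter_range_ext (pp : Nat → Bool) (c N : Nat) (h : c ≤ N) :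
    (List.range c).filter pp = (List.range N).filter (fun i => decide (i < c) && pp i) := by
  rw [show N = c + (N - c) by omega, List.range_add, List.filter_append]
  have h1 : (List.range c).filter (fun i => decide (i < c) && pp i) = (List.range c).filter pp := by
    apply List.filter_congr
    intro x hx
    rw [List.mem_range] at hx
    simp [hx]
  have h2 : ((List.range (N - c)).map (fun x => c + x)).filter
      (fun i => decide (i < c) && pp i) = [] := by
    rw [List.filter_eq_nil_iff]
    intro a ha
    rw [List.mem_map] at ha
    obtain ⟨j, _, rfl⟩ := ha
    simp
  rw [h1, h2, List.append_nil]

theorem range_filter_congr (a b : Nat) (p q : Nat → Bool)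
    (h : ∀ i, (i < a ∧ p i = true) ↔ (i < b ∧ q i = true)) :
    (List.range a).filter p = (List.range b).filter q := by
  rw [filter_range_ext p a (max a b) (le_max_left _ _),
      filter_range_ext q b (max a b) (le_max_right _ _)]
  apply List.filter_congr
  intro x _
  have hx := h x
  by_cases hxa : x < a <;> by_cases hxb : x < b <;>
    by_cases hp : p x = true <;> by_cases hq : q x = true <;>
      simp_all

theorem mem_breaksAlt (s : List Char) (b : Int) (hb : b ∈ breaksAlt s) :
    ∃ i : Nat, b = (i : Int) ∧ i + 1 < s.length := by
  unfold breaksAlt at hb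
  rw [List.mem_map] at hb
  obtain ⟨i, hi, rfl⟩ := hb
  rw [List.mem_filter, List.mem_range] at hi
  exact ⟨i, rfl, by omega⟩

theorem breaksAlt_take (s : List Char) (st : Nat) :
    breaksAlt (s.take st) = (breaksAlt s).filter (fun b => decide (b ≤ (st : Int) - 2)) := by
  unfold breaksAlt
  rw [List.filter_map, List.filter_filter, List.length_take]
  simp only [Function.comp_def]
  congr 1
  apply range_filter_congr
  intro i
  simp only [Bool.and_eq_true, decide_eq_true_eq, bne_iff_ne]
  constructor
  · intro ⟨h1, h2⟩
    have hi1 : i < st := by omega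
    have hi2 : i + 1 < st := by omega
    rw [getD_take s st i hi1, getD_take s st (i + 1) hi2] at h2
    refine ⟨by omega, by push_cast; omega, h2⟩
  · intro ⟨h1, h3, h2⟩
    have hst2 : i + 2 ≤ st := by
      have : (i : Int) + 2 ≤ (st : Int) := by omega
      exact_mod_cast this
    have hi1 : i < st := by omega
    have hi2 : i + 1 < st := by omega
    rw [getD_take s st i hi1, getD_take s st (i + 1) hi2]
    exact ⟨by omega, h2⟩

theorem breaksAlt_drop (s : List Char) (st : Nat) :
    breaksAlt (s.drop (st + 1)) =
      ((breaksAlt s).filter (fun b => decide ((st : Int) + 1 ≤ b))).map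
        (fun b => b + (-((st : Int) + 1))) := by
  unfold breaksAlt
  rw [List.filter_map, List.filter_filter, List.map_map, List.length_drop]
  simp only [Function.comp_def]
  by_cases hc : st + 2 ≤ s.length
  · rw [show s.length - 1 = (st + 1) + (s.length - st - 2) by omega, List.range_add,
        List.filter_append]
    have h1 : List.filter
        (fun (a : Nat) => decide ((st : Int) + 1 ≤ (a : Int)) && s.getD a ' ' != s.getD (a + 1) ' ')
        (List.range (st + 1)) = [] := by
      rw [List.filter_eq_nil_iff]
      intro a ha
      rw [List.mem_range] at ha
      simp only [Bool.and_eq_true, decide_eq_true_eq, not_and]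
      intro hle
      exfalso
      have : (a : Int) < (st : Int) + 1 := by exact_mod_cast ha
      omega
    rw [h1, List.nil_append, List.filter_map, List.map_map]
    simp only [Function.comp_def]
    rw [show s.length - (st + 1) - 1 = s.length - st - 2 by omega]
    have hfil : List.filter
        (fun a => decide ((st : Int) + 1 ≤ ((st + 1 + a : Nat) : Int)) &&
          s.getD (st + 1 + a) ' ' != s.getD (st + 1 + a + 1) ' ')
        (List.range (s.length - st - 2)) =
      List.filter
        (fun i => (s.drop (st + 1)).getD i ' ' != (s.drop (st + 1)).getD (i + 1) ' ')
        (List.range (s.length - st - 2)) := by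
      apply List.filter_congr
      intro j _
      rw [getD_drop, getD_drop]
      have hd : (st : Int) + 1 ≤ ((st + 1 + j : Nat) : Int) := by push_cast; omega
      rw [show st + 1 + (j + 1) = st + 1 + j + 1 by omega]
      simp [hd]
    rw [hfil]
    apply List.map_congr_left
    intro j _
    push_cast
    ring
  · rw [show s.length - (st + 1) - 1 = 0 by omega]
    have h4 : List.filter
        (fun (a : Nat) => decide ((st : Int) + 1 ≤ (a : Int)) && s.getD a ' ' != s.getD (a + 1) ' ')
        (List.range (s.length - 1)) = [] := by
      rw [List.filter_eq_nil_iff]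
      intro a ha
      rw [List.mem_range] at ha
      simp only [Bool.and_eq_true, decide_eq_true_eq, not_and]
      intro hle
      exfalso
      have : (a : Int) < (st : Int) := by exact_mod_cast (by omega : a < st)
      omega
    rw [List.range_zero, List.filter_nil, List.map_nil, h4, List.map_nil]

theorem filter_range_ge (st : Nat) (pp : Nat → Bool) : ∀ N : Nat, st < N →
    (List.range N).filter (fun i => pp i && decide (st ≤ i)) =
      (if pp st then [st] else []) ++ (List.range N).filter (fun i => pp i && decide (st + 1 ≤ i)) := by
  intro N
  induction N with
  | zero => omega
  | succ N ih =>
    intro hst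
    rw [List.range_succ, List.filter_append, List.filter_append]
    by_cases h : st < N
    · rw [ih h, List.append_assoc]
      congr 2
      simp only [List.filter_cons, List.filter_nil]
      have e1 : st ≤ N := by omega
      have e2 : st + 1 ≤ N := by omega
      simp [e1, e2]
    · have hst' : st = N := by omega
      subst hst'
      have h1 : (List.range st).filter (fun i => pp i && decide (st ≤ i)) = [] := by
        rw [List.filter_eq_nil_iff]
        intro a ha
        rw [List.mem_range] at ha
        simp
        omega
      have h2 : (List.range st).filter (fun i => pp i && decide (st + 1 ≤ i)) = [] := by
        rw [List.filter_eq_nil_iff]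
        intro a ha
        rw [List.mem_range] at ha
        simp
        omega
      have h3 : [st].filter (fun i => pp i && decide (st + 1 ≤ i)) = [] := by
        simp
      rw [h1, h2, h3, List.nil_append, List.nil_append, List.append_nil]
      by_cases hp : pp st <;> simp [hp]

theorem breaks_filter_cast (s : List Char) (c : Nat) :
    (breaksAlt s).filter (fun b => decide ((c : Int) ≤ b)) =
      List.map (fun (i : Nat) => (i : Int))
        ((List.range (s.length - 1)).filter
          (fun i => (s.getD i ' ' != s.getD (i + 1) ' ') && decide (c ≤ i))) := by
  unfold breaksAlt
  rw [List.filter_map, List.filter_filter]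
  simp only [Function.comp_def]
  refine congrArg _ ?_
  apply List.filter_congr
  intro x _
  have hdd : decide ((c : Int) ≤ (x : Int)) = decide (c ≤ x) := by
    rw [decide_eq_decide]
    exact_mod_cast Iff.rfl
  rw [hdd, Bool.and_comm]

theorem breaks_filter_all (s : List Char) :
    (breaksAlt s).filter (fun b => decide (((0 : Nat) : Int) ≤ b)) = breaksAlt s := by
  rw [List.filter_eq_self]
  intro b hb
  obtain ⟨i, rfl, _⟩ := mem_breaksAlt s b hb
  simp

theorem breaks_filter_stop (s : List Char) (st : Nat) (h : ¬ st + 1 < s.length) :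
    (breaksAlt s).filter (fun b => decide ((st : Int) ≤ b)) = [] := by
  rw [List.filter_eq_nil_iff]
  intro b hb
  obtain ⟨i, rfl, hi⟩ := mem_breaksAlt s b hb
  simp only [decide_eq_true_eq]
  intro hc
  have : st ≤ i := by exact_mod_cast hc
  omega

theorem breaks_filter_cons (s : List Char) (st : Nat) (h : st + 1 < s.length)
    (hd : s.getD st ' ' ≠ s.getD (st + 1) ' ') :
    (breaksAlt s).filter (fun b => decide ((st : Int) ≤ b)) =
      (st : Int) :: (breaksAlt s).filter (fun b => decide (((st + 1 : Nat) : Int) ≤ b)) := by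
  rw [breaks_filter_cast, breaks_filter_cast,
      filter_range_ge st _ (s.length - 1) (by omega)]
  have hpp : (s.getD st ' ' != s.getD (st + 1) ' ') = true := bne_iff_ne.mpr hd
  rw [hpp]
  simp

theorem breaks_filter_skip (s : List Char) (st : Nat) (h : st + 1 < s.length)
    (hd : ¬ s.getD st ' ' ≠ s.getD (st + 1) ' ') :
    (breaksAlt s).filter (fun b => decide ((st : Int) ≤ b)) =
      (breaksAlt s).filter (fun b => decide (((st + 1 : Nat) : Int) ≤ b)) := by
  rw [breaks_filter_cast, breaks_filter_cast,
      filter_range_ge st _ (s.length - 1) (by omega)]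
  push_neg at hd
  have hpp : (s.getD st ' ' != s.getD (st + 1) ' ') = false := by
    simp only [bne_eq_false_iff_eq]
    exact hd
  rw [hpp]
  simp

theorem bridge (m : Nat) : ∀ (s : List Char) (k n : Int), (k - n + 1).toNat ≤ m →
    numTypos s k n = countB (breaksAlt s) (k - n + 1) := by
  induction m with
  | zero =>
    intro s k n h
    rw [numTypos, countB_nonpos _ _ (by omega), if_pos (Or.inr (by omega))]
  | succ m ih =>
    intro s k n h
    by_cases hnk : n > k
    · rw [numTypos, countB_nonpos _ _ (by omega), if_pos (Or.inr hnk)]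
    by_cases hs : s = []
    · subst hs
      rw [numTypos, if_pos (Or.inl rfl), countB,
          dif_pos (Or.inr (show breaksAlt [] = [] from rfl))]
    have hr : 0 < k - n + 1 := by omega
    have loop : ∀ (d st : Nat), s.length - st ≤ d →
        numTyposLoop s k n st =
          countLoop (breaksAlt s) (k - n + 1) hr
            ((breaksAlt s).filter (fun b => decide ((st : Int) ≤ b))) := by
      intro d
      induction d with
      | zero =>
        intro st hd
        rw [numTyposLoop, if_neg (by omega), breaks_filter_stop s st (by omega), countLoop]
      | succ d ihd =>
        intro st hd
        by_cases hlt : st + 1 < s.length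
        · rw [numTyposLoop, if_pos hlt]
          by_cases hne : s.getD st ' ' ≠ s.getD (st + 1) ' '
          · rw [if_pos hne, breaks_filter_cons s st hlt hne, countLoop]
            have e1 : numTypos (s.take st) k (n + 1) =
                countB ((breaksAlt s).filter (fun x => decide (x ≤ (st : Int) - 2))) (k - n + 1 - 1) := by
              rw [ih (s.take st) k (n + 1) (by omega), breaksAlt_take]
              congr 1
              omega
            have e2 : numTypos (s.drop (st + 1)) k (n + 1) =
                countB ((breaksAlt s).filter (fun x => decide ((st : Int) + 1 ≤ x))) (k - n + 1 - 1) := by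
              rw [ih (s.drop (st + 1)) k (n + 1) (by omega), breaksAlt_drop,
                  countB_shift m _ _ _ (by omega)]
              congr 1
              omega
            rw [e1, e2, ihd (st + 1) (by omega)]
          · rw [if_neg hne, breaks_filter_skip s st hlt hne, ihd (st + 1) (by omega)]
            omega
        · rw [numTyposLoop, if_neg hlt, breaks_filter_stop s st hlt, countLoop]
    rw [numTypos, if_neg (by push_neg; exact ⟨hs, by omega⟩)]
    rw [loop s.length 0 (by omega), breaks_filter_all]
    by_cases hbs : breaksAlt s = []
    · rw [hbs, countLoop, countB, dif_pos (Or.inr rfl)]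
    · rw [countB, dif_neg (by push_neg; exact ⟨by omega, hbs⟩)]

theorem forDomain_eq (domain : String) (k : Int) :
    numTyposForDomain domain k =
      fGhost ((PySem.Chars.splitOn domain.toList ['.']).map breaksAlt) k := by
  unfold numTyposForDomain fGhost
  rw [List.foldl_map]
  apply PySem.List.foldl_congr_mem
  intro acc sp _
  rw [bridge (k - 1 + 1).toNat sp k 1 (le_refl _), show k - 1 + 1 = k by ring]

theorem fGhost_mono (bparts : List (List Int)) (c c' : Int) (h : c ≤ c') :
    fGhost bparts c ≤ fGhost bparts c' := by
  unfold fGhost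
  have aux : ∀ (bp : List (List Int)) (a a' : Int), a ≤ a' →
      bp.foldl (fun acc bs => acc + countB bs c) a ≤ bp.foldl (fun acc bs => acc + countB bs c') a' := by
    intro bp
    induction bp with
    | nil => intro a a' ha; simpa using ha
    | cons bs t iht =>
      intro a a' ha
      simp only [List.foldl_cons]
      apply iht
      have := countB_mono c'.toNat bs c c' h (le_refl _)
      omega
  exact aux bparts 0 0 (le_refl _)

theorem numTyposForDomain_mono (domain : String) (c c' : Int) (h : c ≤ c') :
    numTyposForDomain domain c ≤ numTyposForDomain domain c' := by
  rw [forDomain_eq domain c, forDomain_eq domain c']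
  exact fGhost_mono _ c c' h

-- ===== new lemmas: ghost recurrence = B's capped segment DP =====

theorem breaksAlt_sorted (s : List Char) : List.Pairwise (· < ·) (breaksAlt s) := by
  unfold breaksAlt
  rw [List.pairwise_map]
  have h2 : List.Pairwise (· < ·)
      ((List.range (s.length - 1)).filter (fun i => s.getD i ' ' != s.getD (i + 1) ' ')) :=
    List.Pairwise.sublist List.filter_sublist List.pairwise_lt_range
  exact h2.imp (fun h => by exact_mod_cast h)

theorem filter_eq_take (p : Int → Bool) : ∀ (bs : List Int) (m : Nat), m ≤ bs.length →
    (∀ (i : Nat) (h : i < bs.length), p bs[i] = true ↔ i < m) → bs.filter p = bs.take m := by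
  intro bs
  induction bs with
  | nil => intro m _ _; simp
  | cons a l ih =>
    intro m hm hp
    cases m with
    | zero =>
      have ha : p a = false := by
        have := hp 0 (by simp)
        simp at this
        simpa using this
      have hl : l.filter p = [] := by
        rw [ih 0 (by omega) ?_]
        · simp
        · intro i hi
          have := hp (i + 1) (by simpa using Nat.succ_lt_succ hi)
          simpa using this
      simp [List.filter_cons, ha, hl]
    | succ m' =>
      have ha : p a = true := by
        have := hp 0 (by simp)
        simpa using this.mpr (by omega)
      rw [List.filter_cons, if_pos ha, List.take_succ_cons,
          ih m' (by simpa using hm) ?_]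
      intro i hi
      have := hp (i + 1) (by simpa using Nat.succ_lt_succ hi)
      simp at this
      omega

theorem filter_eq_drop (p : Int → Bool) : ∀ (bs : List Int) (m : Nat),
    (∀ (i : Nat) (h : i < bs.length), p bs[i] = true ↔ m ≤ i) → bs.filter p = bs.drop m := by
  intro bs
  induction bs with
  | nil => intro m _; simp
  | cons a l ih =>
    intro m hp
    cases m with
    | zero =>
      rw [List.drop_zero, List.filter_eq_self]
      intro b hb
      obtain ⟨i, hi, rfl⟩ := List.mem_iff_getElem.mp hb
      exact (hp i hi).mpr (by omega)
    | succ m' =>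
      have ha : p a = false := by
        have := hp 0 (by simp)
        simp at this
        simpa using this
      rw [List.filter_cons, if_neg (by simp [ha]), List.drop_succ_cons,
          ih m' ?_]
      intro i hi
      have := hp (i + 1) (by simpa using Nat.succ_lt_succ hi)
      simp at this
      omega

theorem filter_le_take (bs : List Int) (hs : List.Pairwise (· < ·) bs) (t : Nat)
    (ht : t < bs.length) :
    bs.filter (fun x => decide (x ≤ bs[t] - 2)) =
      bs.take (if 0 < t ∧ bs.getD (t - 1) 0 = bs[t] - 1 then t - 1 else t) := by
  have hmono : ∀ (i j : Nat) (hi : i < bs.length) (hj : j < bs.length), i < j → bs[i] < bs[j] :=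
    fun i j hi hj hij => (List.pairwise_iff_getElem.mp hs) i j hi hj hij
  by_cases hc : 0 < t ∧ bs.getD (t - 1) 0 = bs[t] - 1
  · rw [if_pos hc]
    obtain ⟨ht0, heq⟩ := hc
    have htm : t - 1 < bs.length := by omega
    have heq' : bs[t - 1] = bs[t] - 1 := by
      rwa [List.getD_eq_getElem?_getD, List.getElem?_eq_getElem htm] at heq
    apply filter_eq_take _ bs (t - 1) (by omega)
    intro i hi
    simp only [decide_eq_true_eq]
    constructor
    · intro hle
      by_contra hge
      push_neg at hge
      rcases Nat.lt_or_ge i t with hit | hit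
      · have : i = t - 1 := by omega
        subst this
        omega
      · rcases Nat.eq_or_lt_of_le hit with rfl | hlt
        · omega
        · have := hmono t i ht hi hlt
          omega
    · intro hlt'
      have h1 := hmono i (t - 1) hi htm (by omega)
      omega
  · rw [if_neg hc]
    apply filter_eq_take _ bs t (by omega)
    intro i hi
    simp only [decide_eq_true_eq]
    constructor
    · intro hle
      by_contra hge
      push_neg at hge
      rcases Nat.eq_or_lt_of_le hge with rfl | hlt
      · omega
      · have := hmono t i ht hi hlt
        omega
    · intro hit
      have ht0 : 0 < t := by omega
      have htm : t - 1 < bs.length := by omega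
      have heq' : bs.getD (t - 1) 0 = bs[t - 1] := by
        simp [List.getD_eq_getElem?_getD, List.getElem?_eq_getElem htm]
      have hne : bs[t - 1] ≠ bs[t] - 1 := by
        intro h
        exact hc ⟨ht0, by rw [heq', h]⟩
      have hlt1 : bs[t - 1] < bs[t] := hmono (t - 1) t htm ht (by omega)
      rcases Nat.eq_or_lt_of_le (by omega : i ≤ t - 1) with rfl | hlt2
      · omega
      · have := hmono i (t - 1) hi htm hlt2
        omega

theorem filter_ge_drop (bs : List Int) (hs : List.Pairwise (· < ·) bs) (t : Nat)
    (ht : t < bs.length) :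
    bs.filter (fun x => decide (bs[t] + 1 ≤ x)) = bs.drop (t + 1) := by
  have hmono : ∀ (i j : Nat) (hi : i < bs.length) (hj : j < bs.length), i < j → bs[i] < bs[j] :=
    fun i j hi hj hij => (List.pairwise_iff_getElem.mp hs) i j hi hj hij
  apply filter_eq_drop _ bs (t + 1)
  intro i hi
  simp only [decide_eq_true_eq]
  constructor
  · intro hle
    by_contra hge
    push_neg at hge
    rcases Nat.eq_or_lt_of_le (by omega : i ≤ t) with rfl | hlt
    · omega
    · have := hmono i t hi ht hlt
      omega
  · intro hit
    have := hmono t i ht hi (by omega)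
    omega

theorem cnt_cap (bs : List Int) (a b : Int)
    (h : min a (bs.length : Int) = min b (bs.length : Int)) : cnt bs a = cnt bs b := by
  rw [cnt, cnt, h]

theorem countB_eq_cnt (m : Nat) : ∀ (bs : List Int) (r : Int), r.toNat ≤ m →
    List.Pairwise (· < ·) bs → countB bs r = cnt bs r := by
  induction m with
  | zero =>
    intro bs r h _
    rw [countB_nonpos bs r (by omega), cnt, dif_pos (by omega)]
  | succ m ih =>
    intro bs r h hs
    by_cases hr : r ≤ 0
    · rw [countB_nonpos bs r hr, cnt, dif_pos (by omega)]
    by_cases hbs : bs = []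
    · subst hbs
      rw [countB, dif_pos (Or.inr rfl), cnt, dif_pos (by simp)]
    have hlen : 0 < bs.length := List.length_pos_iff.mpr hbs
    have hlen' : (1 : Int) ≤ (bs.length : Int) := by exact_mod_cast hlen
    rw [countB, dif_neg (by push_neg; exact ⟨by omega, hbs⟩), cnt, dif_neg (by omega)]
    have loop : ∀ (pending : List Int) (t : Nat), pending = bs.drop t →
        countLoop bs r (by omega) pending =
          cntLoop bs (min r (bs.length : Int) - 1) t pending := by
      intro pending
      induction pending with
      | nil => intro t _; rw [countLoop, cntLoop]
      | cons b rest ihp =>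
        intro t hpend
        have ht : t < bs.length := by
          by_contra hge
          push_neg at hge
          rw [List.drop_eq_nil_of_le hge] at hpend
          exact List.cons_ne_nil b rest hpend
        have hdec := List.drop_eq_getElem_cons ht
        rw [hdec] at hpend
        have hb : bs[t] = b := by injection hpend.symm
        have hrest : rest = bs.drop (t + 1) := by injection hpend
        rw [countLoop, cntLoop, ihp (t + 1) hrest]
        have e1 : countB (bs.filter (fun x => decide (x ≤ b - 2))) (r - 1) =
            cnt (if 0 < t ∧ bs.getD (t - 1) 0 = b - 1 then bs.take (t - 1) else bs.take t)
              (min r (bs.length : Int) - 1) := by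
          rw [← hb, filter_le_take bs hs t ht,
              ← apply_ite (fun m : Nat => List.take m bs)]
          have hlt_le : (if 0 < t ∧ bs.getD (t - 1) 0 = bs[t] - 1 then t - 1 else t) ≤ t := by
            split <;> omega
          have hsorted : List.Pairwise (· < ·)
              (bs.take (if 0 < t ∧ bs.getD (t - 1) 0 = bs[t] - 1 then t - 1 else t)) :=
            List.Pairwise.sublist (List.take_sublist _ _) hs
          rw [ih _ (r - 1) (by omega) hsorted]
          apply cnt_cap
          rw [List.length_take]
          omega
        have e2 : countB (bs.filter (fun x => decide (b + 1 ≤ x))) (r - 1) =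
            cnt (bs.drop (t + 1)) (min r (bs.length : Int) - 1) := by
          rw [← hb, filter_ge_drop bs hs t ht]
          have hsorted : List.Pairwise (· < ·) (bs.drop (t + 1)) :=
            List.Pairwise.sublist (List.drop_sublist _ _) hs
          rw [ih _ (r - 1) (by omega) hsorted]
          apply cnt_cap
          rw [List.length_drop]
          omega
        rw [e1, e2]
    exact loop bs 0 (by simp)

-- characterization of the answer: the largest count in [1, n] whose typo total is ≤ n (or 0)
def GoodMax (f : Int → Int) (n r : Int) : Prop :=
  0 ≤ r ∧ (r = 0 ∨ (1 ≤ r ∧ r ≤ n ∧ f r ≤ n)) ∧ ∀ c : Int, r < c → c ≤ n → n < f c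

theorem goodMax_unique (f : Int → Int) (n r1 r2 : Int)
    (h1 : GoodMax f n r1) (h2 : GoodMax f n r2) : r1 = r2 := by
  obtain ⟨h10, h1g, h1a⟩ := h1
  obtain ⟨h20, h2g, h2a⟩ := h2
  by_contra hne
  rcases lt_or_gt_of_ne hne with hlt | hgt
  · rcases h2g with rfl | ⟨ha, hb, hc⟩
    · omega
    · have := h1a r2 hlt hb
      omega
  · rcases h1g with rfl | ⟨ha, hb, hc⟩
    · omega
    · have := h2a r1 hgt hb
      omega

theorem typoLoop_char (domain : String) (n : Int) (fuel : Nat) :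
    ∀ k count : Int, (n + 1 - count).toNat ≤ fuel → 1 ≤ count → 0 ≤ k → k < count →
      (k = 0 ∨ (1 ≤ k ∧ k ≤ n ∧ numTyposForDomain domain k ≤ n)) →
      (∀ c : Int, k < c → c < count → n < numTyposForDomain domain c) →
      GoodMax (numTyposForDomain domain) n (typoLoop domain n k count) := by
  induction fuel with
  | zero =>
    intro k count hf hc1 hk0 hkc hkg hinv
    rw [typoLoop, if_neg (by omega)]
    exact ⟨hk0, hkg, fun c hc hcn => hinv c hc (by omega)⟩
  | succ fuel ih =>
    intro k count hf hc1 hk0 hkc hkg hinv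
    by_cases hc : count ≤ n
    · rw [typoLoop, if_pos hc]
      by_cases hg : numTyposForDomain domain count ≤ n
      · rw [if_pos hg]
        apply ih count (count + 1) (by omega) (by omega) (by omega) (by omega)
          (Or.inr ⟨hc1, hc, hg⟩)
        intro c h1 h2
        omega
      · rw [if_neg hg]
        apply ih k (count + 1) (by omega) (by omega) hk0 (by omega) hkg
        intro c h1 h2
        rcases eq_or_lt_of_le (show c ≤ count by omega) with rfl | hlt
        · omega
        · exact hinv c h1 hlt
    · rw [typoLoop, if_neg hc]
      exact ⟨hk0, hkg, fun c hck hcn => hinv c hck (by omega)⟩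

theorem bsearch_char (bparts : List (List Int)) (n : Int)
    (hmono : ∀ a b : Int, a ≤ b → fAlt bparts a ≤ fAlt bparts b) (fuel : Nat) :
    ∀ lo hi : Int, (hi - lo).toNat ≤ fuel → 0 ≤ lo → lo ≤ hi → hi ≤ n →
      (lo = 0 ∨ (1 ≤ lo ∧ lo ≤ n ∧ fAlt bparts lo ≤ n)) →
      (∀ c : Int, hi < c → c ≤ n → n < fAlt bparts c) →
      GoodMax (fAlt bparts) n (bsearchAlt bparts n lo hi) := by
  induction fuel with
  | zero =>
    intro lo hi hf h0 hlh hhn hg hhi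
    rw [bsearchAlt, dif_neg (by omega)]
    exact ⟨h0, hg, fun c hc hcn => hhi c (by omega) hcn⟩
  | succ fuel ih =>
    intro lo hi hf h0 hlh hhn hg hhi
    by_cases h : lo < hi
    · rw [bsearchAlt, dif_pos h,
          PySem.Int.floordiv_eq_ediv_of_pos (by norm_num : (0:Int) < 2)]
      have hmb : lo < lo + (hi - lo + 1) / 2 ∧ lo + (hi - lo + 1) / 2 ≤ hi := by omega
      by_cases hgm : fAlt bparts (lo + (hi - lo + 1) / 2) ≤ n
      · rw [if_pos hgm]
        exact ih (lo + (hi - lo + 1) / 2) hi (by omega) (by omega) (by omega) hhn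
          (Or.inr ⟨by omega, by omega, hgm⟩) hhi
      · rw [if_neg hgm]
        apply ih lo (lo + (hi - lo + 1) / 2 - 1) (by omega) h0 (by omega) (by omega) hg
        intro c hc hcn
        push_neg at hgm
        have := hmono (lo + (hi - lo + 1) / 2) c (by omega)
        omega
    · rw [bsearchAlt, dif_neg h]
      exact ⟨h0, hg, fun c hc hcn => hhi c (by omega) hcn⟩

theorem forDomain_alt (domain : String) (c : Int) :
    numTyposForDomain domain c =
      fAlt ((PySem.Chars.splitOn domain.toList ['.']).map breaksAlt) c := by
  rw [forDomain_eq]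
  unfold fGhost fAlt
  apply PySem.List.foldl_congr_mem
  intro acc bs hbs
  rw [List.mem_map] at hbs
  obtain ⟨sp, _, rfl⟩ := hbs
  rw [countB_eq_cnt c.toNat (breaksAlt sp) c (le_refl _) (breaksAlt_sorted sp)]

-- ===== VERDICT (by name: the statement is the Claim_ definition above) =====
theorem typosquatting_spec : Claim_equal_typosquatting := by
  intro n domain _
  unfold Spec_typosquatting typosquatting typosquatting_alt
  show (if numTyposForDomain domain 1000 ≤ n then -1 else if n = 0 then 0 else typoLoop domain n 0 1)
      = (if fAlt ((PySem.Chars.splitOn domain.toList ['.']).map breaksAlt) 1000 ≤ n then -1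
         else if n = 0 then 0
         else bsearchAlt ((PySem.Chars.splitOn domain.toList ['.']).map breaksAlt) n 0 n)
  rw [← forDomain_alt domain 1000]
  split_ifs with h1 h2
  · rfl
  · rfl
  · by_cases hn : n < 0
    · rw [typoLoop, if_neg (by omega), bsearchAlt, dif_neg (by omega)]
    · have hn1 : 1 ≤ n := by omega
      have hmono : ∀ a b : Int, a ≤ b →
          fAlt ((PySem.Chars.splitOn domain.toList ['.']).map breaksAlt) a ≤
            fAlt ((PySem.Chars.splitOn domain.toList ['.']).map breaksAlt) b := by
        intro a b hab
        rw [← forDomain_alt, ← forDomain_alt]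
        exact numTyposForDomain_mono domain a b hab
      have hA := typoLoop_char domain n n.toNat 0 1 (by omega) (by omega) (by omega) (by omega)
        (Or.inl rfl) (fun c h1 h2 => by omega)
      have hB := bsearch_char ((PySem.Chars.splitOn domain.toList ['.']).map breaksAlt) n hmono
        n.toNat 0 n (by omega) (by omega) (by omega) (le_refl n) (Or.inl rfl)
        (fun c h1 h2 => by omega)
      have hB' : GoodMax (numTyposForDomain domain) n
          (bsearchAlt ((PySem.Chars.splitOn domain.toList ['.']).map breaksAlt) n 0 n) := by
        obtain ⟨ha, hb, hc⟩ := hB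
        refine ⟨ha, ?_, fun c h1 h2 => by rw [forDomain_alt]; exact hc c h1 h2⟩
        rcases hb with hb | ⟨x, y, z⟩
        · exact Or.inl hb
        · exact Or.inr ⟨x, y, by rw [forDomain_alt]; exact z⟩
      exact goodMax_unique (numTyposForDomain domain) n _ _ hA hB'
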